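-- pv_equiv track=rewrite | github.com/rajib54/backend-take-home-challenge | app/services/url.py | int_to_base62
-- ===== SOURCE A (Python) =====
-- def int_to_base62(n: int) -> str:
--     """
--     Convert an integer to a 7-character Base62 string:
--     - 6 characters for Base62-encoded number (with alphabet+digit padding)
--     - 1 character checksum
--     """
--     if n < 0 or n >= 62**6:
--         raise ValueError("Number out of range for 6-character Base62 encoding")
--
--     base62_chars = "0123456789abcdefghijklmnopqrstuvwxyzABCDEFGHIJKLMNOPQRSTUVWXYZ"
--     base = 62
--     fancy_padding = "a1b2c3d4e5f"  # Must be long enough for 6-character padding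
--
--     # Step 1: Base62 encode (up to 6 characters)
--     result = []
--     while n > 0:
--         n, rem = divmod(n, base)
--         result.append(base62_chars[rem])
--     base62_encoded = ''.join(reversed(result))
--
--     # Step 2: Replace leading padding with non-zero mix
--     pad_len = 6 - len(base62_encoded)
--     padded = fancy_padding[:pad_len] + base62_encoded  # Custom padding
--
--     # Step 3: Compute checksum
--     checksum_value = sum(ord(c) for c in padded) % base
--     checksum_char = base62_chars[checksum_value]
--
--     return padded + checksum_char
-- ===== SOURCE B (Python) =====
-- def int_to_base62(n: int) -> str:
--     if n < 0 or n >= 62**6: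
--         raise ValueError("Number out of range for 6-character Base62 encoding")
--     chars = "0123456789abcdefghijklmnopqrstuvwxyzABCDEFGHIJKLMNOPQRSTUVWXYZ"
--     digits = [chars[(n // 62 ** (5 - i)) % 62] for i in range(6)]
--     lz = 0
--     while lz < 6 and digits[lz] == '0':
--         lz += 1
--     padded = "a1b2c3d4e5f"[:lz] + ''.join(digits[lz:])
--     return padded + chars[sum(ord(c) for c in padded) % 62]
-- ===== Notes on version B (the rewrite author's own statement) =====
-- stated objective: alternative
-- what changed: B computes each of the six base62 digits directly by one division by the corresponding power of the base and one remainder, then counts leading zero digits, instead of A's divmod accumulation loop followed by reversing and length-based padding.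
import Mathlib
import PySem

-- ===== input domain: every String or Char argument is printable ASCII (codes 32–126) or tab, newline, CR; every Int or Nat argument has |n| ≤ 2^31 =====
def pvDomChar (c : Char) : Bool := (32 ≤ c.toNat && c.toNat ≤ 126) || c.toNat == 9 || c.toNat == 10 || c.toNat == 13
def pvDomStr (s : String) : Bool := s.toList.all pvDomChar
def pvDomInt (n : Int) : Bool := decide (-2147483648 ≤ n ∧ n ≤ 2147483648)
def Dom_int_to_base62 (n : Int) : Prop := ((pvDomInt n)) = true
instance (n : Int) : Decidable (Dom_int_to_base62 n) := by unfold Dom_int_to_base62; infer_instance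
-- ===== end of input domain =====

-- B computes the six base62 digits positionally by a closed-form index formula and counts
-- leading '0' digits, instead of A's divmod accumulation loop plus reverse (objective: alternative).

-- ===== PORT A =====
-- base62_chars, shared constant of both Python sources
def pvB62 : List Char := "0123456789abcdefghijklmnopqrstuvwxyzABCDEFGHIJKLMNOPQRSTUVWXYZ".toList
-- base62_chars[r]; getD is never reached with ' ' on admitted inputs (0 ≤ r < 62)
def pvB62get (r : Int) : Char := (PySem.List.pyGet? pvB62 r).getD ' '
def pvFancy : List Char := "a1b2c3d4e5f".toList

-- A's 'while n > 0: n, rem = divmod(n, base); result.append(base62_chars[rem])'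
def pvEncodeLoop (n : Int) (result : List Char) : List Char :=
  if 0 < n then
    pvEncodeLoop (PySem.Int.floordiv n 62) (result ++ [pvB62get (PySem.Int.mod n 62)])
  else result
termination_by n.toNat
decreasing_by
  rw [PySem.Int.floordiv_eq_ediv_of_pos (by omega)]; omega

def int_to_base62 (n : Int) : String :=
  if n < 0 ∨ 62 ^ 6 ≤ n then ""  -- ValueError in Python; excluded by Pre_
  else
    let base62_encoded := (pvEncodeLoop n []).reverse
    let pad_len : Int := 6 - (base62_encoded.length : Int)
    let padded := PySem.List.slice pvFancy none (some pad_len) ++ base62_encoded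
    let checksum_value := PySem.Int.mod ((padded.map (fun c => (c.toNat : Int))).sum) 62
    String.mk (padded ++ [pvB62get checksum_value])

-- ===== PORT B =====
-- B's 'while lz < 6 and digits[lz] == '0': lz += 1'  (lz stays ≥ 0, so Nat)
def pvLzLoop (digits : List Char) (lz : Nat) : Nat :=
  if lz < 6 ∧ (PySem.List.pyGet? digits (lz : Int)).getD ' ' = '0' then
    pvLzLoop digits (lz + 1)
  else lz
termination_by 6 - lz

def int_to_base62_alt (n : Int) : String :=
  if n < 0 ∨ 62 ^ 6 ≤ n then ""  -- ValueError in Python; excluded by Pre_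
  else
    let digits := (List.range 6).map
      (fun i => pvB62get (PySem.Int.mod (PySem.Int.floordiv n ((62 : Int) ^ (5 - i))) 62))
    let lz := pvLzLoop digits 0
    let padded := PySem.List.slice pvFancy none (some (lz : Int)) ++ digits.drop lz
    String.mk (padded ++ [pvB62get (PySem.Int.mod ((padded.map (fun c => (c.toNat : Int))).sum) 62)])

-- ===== PRECONDITION & SPEC =====
-- Pre_ excludes exactly the inputs on which A raises ValueError (n < 0 or n ≥ 62^6).
def Pre_int_to_base62 (n : Int) : Prop := 0 ≤ n ∧ n < 62 ^ 6
instance (n : Int) : Decidable (Pre_int_to_base62 n) := by unfold Pre_int_to_base62; infer_instance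
def pvWitness_int_to_base62 : Int := (5)

def Spec_int_to_base62 (n : Int) (out : String) : Prop := out = int_to_base62_alt n
instance (n : Int) (out : String) : Decidable (Spec_int_to_base62 n out) := by unfold Spec_int_to_base62; infer_instance

-- ===== CLAIM (what is proved, stated in full; the proofs are below) =====
def Claim_equal_int_to_base62 : Prop := ∀ (n : Int), Dom_int_to_base62 n → Pre_int_to_base62 n → Spec_int_to_base62 n (int_to_base62 n)

-- ===== LEMMAS AND PROOFS =====

lemma encode_step (n : Int) (acc : List Char) (h : 0 < n) :
    pvEncodeLoop n acc = pvEncodeLoop (n / 62) (acc ++ [pvB62get (n % 62)]) := by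
  rw [pvEncodeLoop, if_pos h, PySem.Int.floordiv_eq_ediv_of_pos (by norm_num),
      PySem.Int.mod_eq_emod_of_pos (by norm_num)]

lemma encode_stop (n : Int) (acc : List Char) (h : ¬ 0 < n) : pvEncodeLoop n acc = acc := by
  rw [pvEncodeLoop, if_neg h]

lemma lz_step (ds : List Char) (lz : Nat) (h1 : lz < 6)
    (h2 : (PySem.List.pyGet? ds (lz : Int)).getD ' ' = '0') :
    pvLzLoop ds lz = pvLzLoop ds (lz + 1) := by
  rw [pvLzLoop, if_pos ⟨h1, h2⟩]

lemma lz_stop (ds : List Char) (lz : Nat)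
    (h : ¬ (lz < 6 ∧ (PySem.List.pyGet? ds (lz : Int)).getD ' ' = '0')) :
    pvLzLoop ds lz = lz := by
  rw [pvLzLoop, if_neg h]

set_option maxRecDepth 8192 in
lemma b62_ne_zero (r : Int) (h1 : 1 ≤ r) (h2 : r < 62) : pvB62get r ≠ '0' := by
  have hb : ∀ j : Nat, j < 62 → 1 ≤ j → pvB62get (j : Int) ≠ '0' := by decide
  have heq : r = ((r.toNat : Nat) : Int) := by omega
  rw [heq]; exact hb r.toNat (by omega) (by omega)

lemma lzc6 : pvLzLoop ['0','0','0','0','0','0'] 0 = 6 := by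
  rw [lz_step _ _ (by omega) (by simp [PySem.List.pyGet?, PySem.List.pyIdx?]),
      lz_step _ _ (by omega) (by simp [PySem.List.pyGet?, PySem.List.pyIdx?]),
      lz_step _ _ (by omega) (by simp [PySem.List.pyGet?, PySem.List.pyIdx?]),
      lz_step _ _ (by omega) (by simp [PySem.List.pyGet?, PySem.List.pyIdx?]),
      lz_step _ _ (by omega) (by simp [PySem.List.pyGet?, PySem.List.pyIdx?]),
      lz_step _ _ (by omega) (by simp [PySem.List.pyGet?, PySem.List.pyIdx?]),
      lz_stop _ _ (by omega)]

lemma lzc0 (c d e f g h : Char) (hc : c ≠ '0') : pvLzLoop [c,d,e,f,g,h] 0 = 0 := by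
  rw [lz_stop]
  simp [PySem.List.pyGet?, PySem.List.pyIdx?, hc]

lemma lzc1 (c d e f g : Char) (hc : c ≠ '0') : pvLzLoop ['0',c,d,e,f,g] 0 = 1 := by
  rw [lz_step _ _ (by omega) (by simp [PySem.List.pyGet?, PySem.List.pyIdx?]),
      lz_stop]
  simp [PySem.List.pyGet?, PySem.List.pyIdx?, hc]

lemma lzc2 (c d e f : Char) (hc : c ≠ '0') : pvLzLoop ['0','0',c,d,e,f] 0 = 2 := by
  rw [lz_step _ _ (by omega) (by simp [PySem.List.pyGet?, PySem.List.pyIdx?]),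
      lz_step _ _ (by omega) (by simp [PySem.List.pyGet?, PySem.List.pyIdx?]),
      lz_stop]
  simp [PySem.List.pyGet?, PySem.List.pyIdx?, hc]

lemma lzc3 (c d e : Char) (hc : c ≠ '0') : pvLzLoop ['0','0','0',c,d,e] 0 = 3 := by
  rw [lz_step _ _ (by omega) (by simp [PySem.List.pyGet?, PySem.List.pyIdx?]),
      lz_step _ _ (by omega) (by simp [PySem.List.pyGet?, PySem.List.pyIdx?]),
      lz_step _ _ (by omega) (by simp [PySem.List.pyGet?, PySem.List.pyIdx?]),
      lz_stop]
  simp [PySem.List.pyGet?, PySem.List.pyIdx?, hc]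

lemma lzc4 (c d : Char) (hc : c ≠ '0') : pvLzLoop ['0','0','0','0',c,d] 0 = 4 := by
  rw [lz_step _ _ (by omega) (by simp [PySem.List.pyGet?, PySem.List.pyIdx?]),
      lz_step _ _ (by omega) (by simp [PySem.List.pyGet?, PySem.List.pyIdx?]),
      lz_step _ _ (by omega) (by simp [PySem.List.pyGet?, PySem.List.pyIdx?]),
      lz_step _ _ (by omega) (by simp [PySem.List.pyGet?, PySem.List.pyIdx?]),
      lz_stop]
  simp [PySem.List.pyGet?, PySem.List.pyIdx?, hc]

lemma lzc5 (c : Char) (hc : c ≠ '0') : pvLzLoop ['0','0','0','0','0',c] 0 = 5 := by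
  rw [lz_step _ _ (by omega) (by simp [PySem.List.pyGet?, PySem.List.pyIdx?]),
      lz_step _ _ (by omega) (by simp [PySem.List.pyGet?, PySem.List.pyIdx?]),
      lz_step _ _ (by omega) (by simp [PySem.List.pyGet?, PySem.List.pyIdx?]),
      lz_step _ _ (by omega) (by simp [PySem.List.pyGet?, PySem.List.pyIdx?]),
      lz_step _ _ (by omega) (by simp [PySem.List.pyGet?, PySem.List.pyIdx?]),
      lz_stop]
  simp [PySem.List.pyGet?, PySem.List.pyIdx?, hc]

lemma pvCase0 (n : Int) (hlo : 0 ≤ n) (hhi : n < 1) :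
    int_to_base62 n = int_to_base62_alt n := by
  rw [int_to_base62, int_to_base62_alt, if_neg (by omega), if_neg (by omega)]
  have hA : pvEncodeLoop n [] = [] := encode_stop _ _ (by omega)
  have hrange : List.range 6 = [0,1,2,3,4,5] := by decide
  rw [hrange]
  simp only [List.map]
  rw [show ((62:Int)^(5-0)) = 916132832 from by norm_num,
      show ((62:Int)^(5-1)) = 14776336 from by norm_num,
      show ((62:Int)^(5-2)) = 238328 from by norm_num,
      show ((62:Int)^(5-3)) = 3844 from by norm_num,
      show ((62:Int)^(5-4)) = 62 from by norm_num,
      show ((62:Int)^(5-5)) = 1 from by norm_num]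
  rw [PySem.Int.floordiv_eq_ediv_of_pos (show (0:Int) < 916132832 by norm_num),
      PySem.Int.floordiv_eq_ediv_of_pos (show (0:Int) < 14776336 by norm_num),
      PySem.Int.floordiv_eq_ediv_of_pos (show (0:Int) < 238328 by norm_num),
      PySem.Int.floordiv_eq_ediv_of_pos (show (0:Int) < 3844 by norm_num),
      PySem.Int.floordiv_eq_ediv_of_pos (show (0:Int) < 62 by norm_num),
      PySem.Int.floordiv_eq_ediv_of_pos (show (0:Int) < 1 by norm_num)]
  simp only [PySem.Int.mod_eq_emod_of_pos (show (0:Int) < 62 by norm_num)]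
  rw [show n / 916132832 = 0 from by omega, show n / 14776336 = 0 from by omega, show n / 238328 = 0 from by omega, show n / 3844 = 0 from by omega, show n / 62 = 0 from by omega , show n / 1 = 0 from by omega]
  rw [show ((0:Int) % 62) = 0 from by norm_num]
  rw [show pvB62get 0 = '0' from by decide]
  rw [hA]
  simp only [List.reverse_cons, List.reverse_nil, List.nil_append, List.cons_append,
    List.length_cons, List.length_nil]
  rw [lzc6]
  norm_num

lemma pvCase1 (n : Int) (hlo : 1 ≤ n) (hhi : n < 62) :
    int_to_base62 n = int_to_base62_alt n := by
  rw [int_to_base62, int_to_base62_alt, if_neg (by omega), if_neg (by omega)]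
  have hA : pvEncodeLoop n [] = [pvB62get (n % 62)] := by
    rw [encode_step n [] (by omega),
        encode_stop _ _ (by omega)]
    simp
  have hrange : List.range 6 = [0,1,2,3,4,5] := by decide
  rw [hrange]
  simp only [List.map]
  rw [show ((62:Int)^(5-0)) = 916132832 from by norm_num,
      show ((62:Int)^(5-1)) = 14776336 from by norm_num,
      show ((62:Int)^(5-2)) = 238328 from by norm_num,
      show ((62:Int)^(5-3)) = 3844 from by norm_num,
      show ((62:Int)^(5-4)) = 62 from by norm_num,
      show ((62:Int)^(5-5)) = 1 from by norm_num]
  rw [PySem.Int.floordiv_eq_ediv_of_pos (show (0:Int) < 916132832 by norm_num),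
      PySem.Int.floordiv_eq_ediv_of_pos (show (0:Int) < 14776336 by norm_num),
      PySem.Int.floordiv_eq_ediv_of_pos (show (0:Int) < 238328 by norm_num),
      PySem.Int.floordiv_eq_ediv_of_pos (show (0:Int) < 3844 by norm_num),
      PySem.Int.floordiv_eq_ediv_of_pos (show (0:Int) < 62 by norm_num),
      PySem.Int.floordiv_eq_ediv_of_pos (show (0:Int) < 1 by norm_num)]
  simp only [PySem.Int.mod_eq_emod_of_pos (show (0:Int) < 62 by norm_num)]
  rw [show n / 916132832 = 0 from by omega, show n / 14776336 = 0 from by omega, show n / 238328 = 0 from by omega, show n / 3844 = 0 from by omega, show n / 62 = 0 from by omega, show n / 1 = n from by omega]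
  rw [show ((0:Int) % 62) = 0 from by norm_num]
  rw [show pvB62get 0 = '0' from by decide]
  rw [hA]
  simp only [List.reverse_cons, List.reverse_nil, List.nil_append, List.cons_append,
    List.length_cons, List.length_nil]
  rw [lzc5 _ (b62_ne_zero _ (by omega) (by omega))]
  norm_num

lemma pvCase2 (n : Int) (hlo : 62 ≤ n) (hhi : n < 3844) :
    int_to_base62 n = int_to_base62_alt n := by
  rw [int_to_base62, int_to_base62_alt, if_neg (by omega), if_neg (by omega)]
  have hA : pvEncodeLoop n [] = [pvB62get (n % 62), pvB62get (n / 62 % 62)] := by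
    rw [encode_step n [] (by omega),
        encode_step _ _ (by omega),
        encode_stop _ _ (by omega)]

    simp
  have hrange : List.range 6 = [0,1,2,3,4,5] := by decide
  rw [hrange]
  simp only [List.map]
  rw [show ((62:Int)^(5-0)) = 916132832 from by norm_num,
      show ((62:Int)^(5-1)) = 14776336 from by norm_num,
      show ((62:Int)^(5-2)) = 238328 from by norm_num,
      show ((62:Int)^(5-3)) = 3844 from by norm_num,
      show ((62:Int)^(5-4)) = 62 from by norm_num,
      show ((62:Int)^(5-5)) = 1 from by norm_num]
  rw [PySem.Int.floordiv_eq_ediv_of_pos (show (0:Int) < 916132832 by norm_num),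
      PySem.Int.floordiv_eq_ediv_of_pos (show (0:Int) < 14776336 by norm_num),
      PySem.Int.floordiv_eq_ediv_of_pos (show (0:Int) < 238328 by norm_num),
      PySem.Int.floordiv_eq_ediv_of_pos (show (0:Int) < 3844 by norm_num),
      PySem.Int.floordiv_eq_ediv_of_pos (show (0:Int) < 62 by norm_num),
      PySem.Int.floordiv_eq_ediv_of_pos (show (0:Int) < 1 by norm_num)]
  simp only [PySem.Int.mod_eq_emod_of_pos (show (0:Int) < 62 by norm_num)]
  rw [show n / 916132832 = 0 from by omega, show n / 14776336 = 0 from by omega, show n / 238328 = 0 from by omega, show n / 3844 = 0 from by omega, show n / 1 = n from by omega]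
  rw [show ((0:Int) % 62) = 0 from by norm_num]
  rw [show pvB62get 0 = '0' from by decide]
  rw [hA]
  simp only [List.reverse_cons, List.reverse_nil, List.nil_append, List.cons_append,
    List.length_cons, List.length_nil]
  rw [lzc4 _ _ (b62_ne_zero _ (by omega) (by omega))]
  norm_num

lemma pvCase3 (n : Int) (hlo : 3844 ≤ n) (hhi : n < 238328) :
    int_to_base62 n = int_to_base62_alt n := by
  rw [int_to_base62, int_to_base62_alt, if_neg (by omega), if_neg (by omega)]
  have hA : pvEncodeLoop n [] = [pvB62get (n % 62), pvB62get (n / 62 % 62), pvB62get (n / 3844 % 62)] := by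
    rw [encode_step n [] (by omega),
        encode_step _ _ (by omega),
        encode_step _ _ (by omega),
        encode_stop _ _ (by omega)]
    rw [show n / 62 / 62 = n / 3844 from by omega]
    simp
  have hrange : List.range 6 = [0,1,2,3,4,5] := by decide
  rw [hrange]
  simp only [List.map]
  rw [show ((62:Int)^(5-0)) = 916132832 from by norm_num,
      show ((62:Int)^(5-1)) = 14776336 from by norm_num,
      show ((62:Int)^(5-2)) = 238328 from by norm_num,
      show ((62:Int)^(5-3)) = 3844 from by norm_num,
      show ((62:Int)^(5-4)) = 62 from by norm_num,
      show ((62:Int)^(5-5)) = 1 from by norm_num]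
  rw [PySem.Int.floordiv_eq_ediv_of_pos (show (0:Int) < 916132832 by norm_num),
      PySem.Int.floordiv_eq_ediv_of_pos (show (0:Int) < 14776336 by norm_num),
      PySem.Int.floordiv_eq_ediv_of_pos (show (0:Int) < 238328 by norm_num),
      PySem.Int.floordiv_eq_ediv_of_pos (show (0:Int) < 3844 by norm_num),
      PySem.Int.floordiv_eq_ediv_of_pos (show (0:Int) < 62 by norm_num),
      PySem.Int.floordiv_eq_ediv_of_pos (show (0:Int) < 1 by norm_num)]
  simp only [PySem.Int.mod_eq_emod_of_pos (show (0:Int) < 62 by norm_num)]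
  rw [show n / 916132832 = 0 from by omega, show n / 14776336 = 0 from by omega, show n / 238328 = 0 from by omega, show n / 1 = n from by omega]
  rw [show ((0:Int) % 62) = 0 from by norm_num]
  rw [show pvB62get 0 = '0' from by decide]
  rw [hA]
  simp only [List.reverse_cons, List.reverse_nil, List.nil_append, List.cons_append,
    List.length_cons, List.length_nil]
  rw [lzc3 _ _ _ (b62_ne_zero _ (by omega) (by omega))]
  norm_num

lemma pvCase4 (n : Int) (hlo : 238328 ≤ n) (hhi : n < 14776336) :
    int_to_base62 n = int_to_base62_alt n := by
  rw [int_to_base62, int_to_base62_alt, if_neg (by omega), if_neg (by omega)]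
  have hA : pvEncodeLoop n [] = [pvB62get (n % 62), pvB62get (n / 62 % 62), pvB62get (n / 3844 % 62), pvB62get (n / 238328 % 62)] := by
    rw [encode_step n [] (by omega),
        encode_step _ _ (by omega),
        encode_step _ _ (by omega),
        encode_step _ _ (by omega),
        encode_stop _ _ (by omega)]
    rw [show n / 62 / 62 = n / 3844 from by omega, show n / 3844 / 62 = n / 238328 from by omega]
    simp
  have hrange : List.range 6 = [0,1,2,3,4,5] := by decide
  rw [hrange]
  simp only [List.map]
  rw [show ((62:Int)^(5-0)) = 916132832 from by norm_num,
      show ((62:Int)^(5-1)) = 14776336 from by norm_num,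
      show ((62:Int)^(5-2)) = 238328 from by norm_num,
      show ((62:Int)^(5-3)) = 3844 from by norm_num,
      show ((62:Int)^(5-4)) = 62 from by norm_num,
      show ((62:Int)^(5-5)) = 1 from by norm_num]
  rw [PySem.Int.floordiv_eq_ediv_of_pos (show (0:Int) < 916132832 by norm_num),
      PySem.Int.floordiv_eq_ediv_of_pos (show (0:Int) < 14776336 by norm_num),
      PySem.Int.floordiv_eq_ediv_of_pos (show (0:Int) < 238328 by norm_num),
      PySem.Int.floordiv_eq_ediv_of_pos (show (0:Int) < 3844 by norm_num),
      PySem.Int.floordiv_eq_ediv_of_pos (show (0:Int) < 62 by norm_num),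
      PySem.Int.floordiv_eq_ediv_of_pos (show (0:Int) < 1 by norm_num)]
  simp only [PySem.Int.mod_eq_emod_of_pos (show (0:Int) < 62 by norm_num)]
  rw [show n / 916132832 = 0 from by omega, show n / 14776336 = 0 from by omega, show n / 1 = n from by omega]
  rw [show ((0:Int) % 62) = 0 from by norm_num]
  rw [show pvB62get 0 = '0' from by decide]
  rw [hA]
  simp only [List.reverse_cons, List.reverse_nil, List.nil_append, List.cons_append,
    List.length_cons, List.length_nil]
  rw [lzc2 _ _ _ _ (b62_ne_zero _ (by omega) (by omega))]
  norm_num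

lemma pvCase5 (n : Int) (hlo : 14776336 ≤ n) (hhi : n < 916132832) :
    int_to_base62 n = int_to_base62_alt n := by
  rw [int_to_base62, int_to_base62_alt, if_neg (by omega), if_neg (by omega)]
  have hA : pvEncodeLoop n [] = [pvB62get (n % 62), pvB62get (n / 62 % 62), pvB62get (n / 3844 % 62), pvB62get (n / 238328 % 62), pvB62get (n / 14776336 % 62)] := by
    rw [encode_step n [] (by omega),
        encode_step _ _ (by omega),
        encode_step _ _ (by omega),
        encode_step _ _ (by omega),
        encode_step _ _ (by omega),
        encode_stop _ _ (by omega)]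
    rw [show n / 62 / 62 = n / 3844 from by omega, show n / 3844 / 62 = n / 238328 from by omega, show n / 238328 / 62 = n / 14776336 from by omega]
    simp
  have hrange : List.range 6 = [0,1,2,3,4,5] := by decide
  rw [hrange]
  simp only [List.map]
  rw [show ((62:Int)^(5-0)) = 916132832 from by norm_num,
      show ((62:Int)^(5-1)) = 14776336 from by norm_num,
      show ((62:Int)^(5-2)) = 238328 from by norm_num,
      show ((62:Int)^(5-3)) = 3844 from by norm_num,
      show ((62:Int)^(5-4)) = 62 from by norm_num,
      show ((62:Int)^(5-5)) = 1 from by norm_num]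
  rw [PySem.Int.floordiv_eq_ediv_of_pos (show (0:Int) < 916132832 by norm_num),
      PySem.Int.floordiv_eq_ediv_of_pos (show (0:Int) < 14776336 by norm_num),
      PySem.Int.floordiv_eq_ediv_of_pos (show (0:Int) < 238328 by norm_num),
      PySem.Int.floordiv_eq_ediv_of_pos (show (0:Int) < 3844 by norm_num),
      PySem.Int.floordiv_eq_ediv_of_pos (show (0:Int) < 62 by norm_num),
      PySem.Int.floordiv_eq_ediv_of_pos (show (0:Int) < 1 by norm_num)]
  simp only [PySem.Int.mod_eq_emod_of_pos (show (0:Int) < 62 by norm_num)]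
  rw [show n / 916132832 = 0 from by omega, show n / 1 = n from by omega]
  rw [show ((0:Int) % 62) = 0 from by norm_num]
  rw [show pvB62get 0 = '0' from by decide]
  rw [hA]
  simp only [List.reverse_cons, List.reverse_nil, List.nil_append, List.cons_append,
    List.length_cons, List.length_nil]
  rw [lzc1 _ _ _ _ _ (b62_ne_zero _ (by omega) (by omega))]
  norm_num

lemma pvCase6 (n : Int) (hlo : 916132832 ≤ n) (hhi : n < 56800235584) :
    int_to_base62 n = int_to_base62_alt n := by
  rw [int_to_base62, int_to_base62_alt, if_neg (by omega), if_neg (by omega)]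
  have hA : pvEncodeLoop n [] = [pvB62get (n % 62), pvB62get (n / 62 % 62), pvB62get (n / 3844 % 62), pvB62get (n / 238328 % 62), pvB62get (n / 14776336 % 62), pvB62get (n / 916132832 % 62)] := by
    rw [encode_step n [] (by omega),
        encode_step _ _ (by omega),
        encode_step _ _ (by omega),
        encode_step _ _ (by omega),
        encode_step _ _ (by omega),
        encode_step _ _ (by omega),
        encode_stop _ _ (by omega)]
    rw [show n / 62 / 62 = n / 3844 from by omega, show n / 3844 / 62 = n / 238328 from by omega, show n / 238328 / 62 = n / 14776336 from by omega, show n / 14776336 / 62 = n / 916132832 from by omega]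
    simp
  have hrange : List.range 6 = [0,1,2,3,4,5] := by decide
  rw [hrange]
  simp only [List.map]
  rw [show ((62:Int)^(5-0)) = 916132832 from by norm_num,
      show ((62:Int)^(5-1)) = 14776336 from by norm_num,
      show ((62:Int)^(5-2)) = 238328 from by norm_num,
      show ((62:Int)^(5-3)) = 3844 from by norm_num,
      show ((62:Int)^(5-4)) = 62 from by norm_num,
      show ((62:Int)^(5-5)) = 1 from by norm_num]
  rw [PySem.Int.floordiv_eq_ediv_of_pos (show (0:Int) < 916132832 by norm_num),
      PySem.Int.floordiv_eq_ediv_of_pos (show (0:Int) < 14776336 by norm_num),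
      PySem.Int.floordiv_eq_ediv_of_pos (show (0:Int) < 238328 by norm_num),
      PySem.Int.floordiv_eq_ediv_of_pos (show (0:Int) < 3844 by norm_num),
      PySem.Int.floordiv_eq_ediv_of_pos (show (0:Int) < 62 by norm_num),
      PySem.Int.floordiv_eq_ediv_of_pos (show (0:Int) < 1 by norm_num)]
  simp only [PySem.Int.mod_eq_emod_of_pos (show (0:Int) < 62 by norm_num)]
  rw [show n / 1 = n from by omega]
  -- no zero digits
  rw [hA]
  simp only [List.reverse_cons, List.reverse_nil, List.nil_append, List.cons_append,
    List.length_cons, List.length_nil]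
  rw [lzc0 _ _ _ _ _ _ (b62_ne_zero _ (by omega) (by omega))]
  norm_num

-- ===== VERDICT (by name: the statement is the Claim_ definition above) =====
theorem int_to_base62_spec : Claim_equal_int_to_base62 := by
  intro n _ hpre
  obtain ⟨h0, h6⟩ := hpre
  have h6' : n < 56800235584 := by
    have : (62:Int)^6 = 56800235584 := by norm_num
    omega
  show int_to_base62 n = int_to_base62_alt n
  by_cases h1 : n < 1
  · exact pvCase0 n h0 (by omega)
  by_cases h2 : n < 62
  · exact pvCase1 n (by omega) h2
  by_cases h3 : n < 3844
  · exact pvCase2 n (by omega) h3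
  by_cases h4 : n < 238328
  · exact pvCase3 n (by omega) h4
  by_cases h5 : n < 14776336
  · exact pvCase4 n (by omega) h5
  by_cases h7 : n < 916132832
  · exact pvCase5 n (by omega) h7
  exact pvCase6 n (by omega) h6'
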